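-- pv_equiv track=rewrite | github.com/D1viner/Clawer | data_clean.py | clean_reduplicated_data
-- ===== SOURCE A (Python) =====
-- def clean_reduplicated_data(sen):
--     count = {}
--     for word in sen:
--         count.setdefault(word, 0)
--         count[word] = count[word] + 1
--     idx = len(sen)
--     for key, value in count.items():
--         if value == idx:
--             sen = ''
--     return sen
-- ===== SOURCE B (Python) =====
-- def clean_reduplicated_data(sen):
--     if not sen or all(c == sen[0] for c in sen):
--         return ''
--     return sen
-- ===== Notes on version B (the rewrite author's own statement) =====
-- stated objective: simpler
-- what changed: B drops A's frequency-dictionary-then-scan strategy and directly checks in one pass whether the string is empty or all characters equal the first one.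
import Mathlib
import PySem

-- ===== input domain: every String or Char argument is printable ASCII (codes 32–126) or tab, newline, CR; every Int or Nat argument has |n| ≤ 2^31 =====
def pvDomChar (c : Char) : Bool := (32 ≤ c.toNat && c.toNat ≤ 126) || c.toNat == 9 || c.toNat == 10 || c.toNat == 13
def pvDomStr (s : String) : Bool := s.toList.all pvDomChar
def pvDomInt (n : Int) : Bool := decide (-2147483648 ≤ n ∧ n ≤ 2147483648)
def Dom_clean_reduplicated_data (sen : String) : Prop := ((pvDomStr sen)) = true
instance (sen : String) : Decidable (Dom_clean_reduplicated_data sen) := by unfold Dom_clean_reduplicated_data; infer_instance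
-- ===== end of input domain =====

-- B replaces A's build-a-character-frequency-dict-then-scan with a direct single-pass
-- "all characters equal the first" check; same O(n) cost, simpler.


-- ===== PORT A =====
def clean_reduplicated_data (sen : String) : String :=
  -- count = {}; for word in sen: count.setdefault(word, 0); count[word] = count[word] + 1
  let count : PySem.Dict Char Int := sen.toList.foldl
    (fun d w =>
      let d1 := d.setdefault w 0
      d1.insert w (d1.getD w 0 + 1))
    PySem.Dict.empty
  -- idx = len(sen)
  let idx := PySem.Str.len sen
  -- for key, value in count.items(): if value == idx: sen = ''
  count.items.foldl (fun s p => if p.2 == idx then "" else s) sen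

-- ===== PORT B =====
def clean_reduplicated_data_alt (sen : String) : String :=
  -- if not sen or all(c == sen[0] for c in sen): return ''  /  return sen
  match sen.toList with
  | [] => ""
  | c :: _ => if sen.toList.all (fun x => x == c) then "" else sen

-- ===== PRECONDITION & SPEC =====
def Spec_clean_reduplicated_data (sen : String) (out : String) : Prop := out = clean_reduplicated_data_alt sen
instance (sen : String) (out : String) : Decidable (Spec_clean_reduplicated_data sen out) := by unfold Spec_clean_reduplicated_data; infer_instance

-- ===== CLAIM (what is proved, stated in full; the proofs are below) =====
def Claim_equal_clean_reduplicated_data : Prop := ∀ (sen : String), Dom_clean_reduplicated_data sen → Spec_clean_reduplicated_data sen (clean_reduplicated_data sen)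

-- ===== LEMMAS AND PROOFS =====

-- A's second loop: the state becomes "" iff some item's value equals n.
lemma foldl_blank (items : List (Char × Int)) (n : Int) (init : String) :
    items.foldl (fun s p => if p.2 == n then "" else s) init =
    if items.any (fun p => p.2 == n) then "" else init := by
  induction items generalizing init with
  | nil => simp
  | cons p rest ih =>
      simp only [List.foldl_cons, List.any_cons, ih]
      by_cases h : p.2 = n <;> simp [h]

-- A's first loop is collections.Counter.
lemma count_loop_eq_counter (l : List Char) :
    l.foldl (fun d w =>
        let d1 := d.setdefault w 0
        d1.insert w (d1.getD w 0 + 1)) (PySem.Dict.empty : PySem.Dict Char Int)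
      = PySem.Dict.counter l := by
  have hstep : (fun (d : PySem.Dict Char Int) (w : Char) =>
      let d1 := d.setdefault w 0
      d1.insert w (d1.getD w 0 + 1)) = fun d w => d.insert w (d.getD w 0 + 1) := by
    funext d w
    show (d.setdefault w 0).insert w ((d.setdefault w 0).getD w 0 + 1)
        = d.insert w (d.getD w 0 + 1)
    have hg : (d.setdefault w 0).getD w 0 = d.getD w 0 := by
      rw [PySem.Dict.getD_eq_get?_getD, PySem.Dict.get?_setdefault_self,
        PySem.Dict.getD_eq_get?_getD]
      cases d.get? w <;> rfl
    rw [hg]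
    by_cases hc : d.contains w = true
    · rw [PySem.Dict.setdefault_of_contains d 0 hc]
    · rw [PySem.Dict.setdefault_of_not_contains d 0 (by simpa using hc),
        PySem.Dict.insert_insert_self]
  rw [hstep, PySem.Dict.foldl_insert_getD_add_one_eq_counter]

lemma string_eq_empty_of_toList (sen : String) (h : sen.toList = []) : sen = "" :=
  String.toList_eq_nil_iff.mp h

-- ===== VERDICT (by name: the statement is the Claim_ definition above) =====
theorem clean_reduplicated_data_spec : Claim_equal_clean_reduplicated_data := by
  intro sen _
  show clean_reduplicated_data sen = clean_reduplicated_data_alt sen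
  unfold clean_reduplicated_data clean_reduplicated_data_alt
  rw [count_loop_eq_counter]
  simp only [PySem.Dict.items_counter, foldl_blank]
  cases hl : sen.toList with
  | nil =>
      simp [string_eq_empty_of_toList sen hl]
  | cons c t =>
      simp only [List.any_map, Function.comp_def, PySem.Str.len_eq, hl]
      by_cases hall : ∀ x ∈ (c :: t : List Char), x = c
      · have hcnt : (c :: t : List Char).count c = (c :: t : List Char).length := by
          rw [List.count_eq_length]
          intro b hb; exact (hall b hb).symm
        have hany : ((PySem.Set.ofList (c :: t)).any
            (fun k => ((k, ((c :: t : List Char).count k : Int)).2 == ((c :: t : List Char).length : Int)))) = true := by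
          rw [List.any_eq_true]
          exact ⟨c, by simp [PySem.Set.mem_ofList], by simp [hcnt]⟩
        have hb : ((c :: t).all fun x => x == c) = true := by
          simp only [List.all_eq_true, beq_iff_eq]; exact hall
        rw [hany, hb]
      · have hany : ((PySem.Set.ofList (c :: t)).any
            (fun k => ((k, ((c :: t : List Char).count k : Int)).2 == ((c :: t : List Char).length : Int)))) = false := by
          rw [List.any_eq_false]
          intro k hk
          simp only [beq_iff_eq, Int.natCast_inj]
          intro hcnt
          rw [List.count_eq_length] at hcnt
          exact hall (fun x hx => ((hcnt x hx).symm).trans (hcnt c List.mem_cons_self))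
        have hb : ((c :: t).all fun x => x == c) = false := by
          simp only [Bool.eq_false_iff, ne_eq, List.all_eq_true, beq_iff_eq]
          exact hall
        rw [hany, hb]
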